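-- pv_equiv track=rewrite | github.com/wbieniec/controlled-plag-check | tests/test1_rename/A_ren(0.400).py | find_max_diff_pair
-- ===== SOURCE A (Python) =====
-- def find_max_diff_pair(eorabr):
--     bhvbgybhg = 0
--     yuznyhj = None
--     for ljrfgk, second in eorabr:
--         cyawjysuqk = second - ljrfgk
--         if cyawjysuqk > bhvbgybhg:
--             bhvbgybhg = cyawjysuqk
--             yuznyhj = (ljrfgk, second)
--     return yuznyhj
-- ===== SOURCE B (Python) =====
-- def find_max_diff_pair(eorabr):
--     ranked = sorted(eorabr, key=lambda p: p[1] - p[0], reverse=True)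
--     if ranked and ranked[0][1] - ranked[0][0] > 0:
--         return ranked[0]
--     return None
-- ===== Notes on version B (the rewrite author's own statement) =====
-- stated objective: alternative
-- what changed: Replaced A's single-pass best-so-far accumulator by a stable reverse sort of the whole list by difference, then reading the head and applying the positivity threshold; stability of sorted with reverse=True preserves A's first-wins tie-breaking.
import Mathlib
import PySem

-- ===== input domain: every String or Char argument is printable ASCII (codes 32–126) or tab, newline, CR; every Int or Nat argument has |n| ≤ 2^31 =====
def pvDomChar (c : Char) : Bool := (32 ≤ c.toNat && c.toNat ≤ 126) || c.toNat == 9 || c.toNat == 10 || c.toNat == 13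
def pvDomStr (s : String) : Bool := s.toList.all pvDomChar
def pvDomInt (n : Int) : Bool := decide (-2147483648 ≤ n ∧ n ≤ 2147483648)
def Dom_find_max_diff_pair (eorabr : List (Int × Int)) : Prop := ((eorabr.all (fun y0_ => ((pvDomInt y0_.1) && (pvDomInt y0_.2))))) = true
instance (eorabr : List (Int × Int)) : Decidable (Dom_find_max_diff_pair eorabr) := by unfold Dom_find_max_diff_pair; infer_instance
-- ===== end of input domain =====

-- B replaces A's best-so-far scan by a stable reverse sort by difference followed by a head read and a positivity check (objective: alternative).

-- ===== PORT A =====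
-- A's loop: state (bhvbgybhg, yuznyhj), update when second - first strictly exceeds the best so far.
def pvLoopA : List (Int × Int) → Int → Option (Int × Int) → Option (Int × Int)
  | [], _, yuznyhj => yuznyhj
  | (ljrfgk, second) :: t, bhvbgybhg, yuznyhj =>
      let cyawjysuqk := second - ljrfgk
      if cyawjysuqk > bhvbgybhg then pvLoopA t cyawjysuqk (some (ljrfgk, second))
      else pvLoopA t bhvbgybhg yuznyhj

def find_max_diff_pair (eorabr : List (Int × Int)) : Option (Int × Int) :=
  pvLoopA eorabr 0 none

-- ===== PORT B =====
-- ranked = sorted(eorabr, key=lambda p: p[1]-p[0], reverse=True); head if its diff > 0 else None.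
def find_max_diff_pair_alt (eorabr : List (Int × Int)) : Option (Int × Int) :=
  let ranked := PySem.List.sorted eorabr (fun p => p.2 - p.1) true
  match ranked with
  | [] => none
  | m :: _ => if m.2 - m.1 > 0 then some m else none

-- ===== PRECONDITION & SPEC =====
def Spec_find_max_diff_pair (eorabr : List (Int × Int)) (out : Option (Int × Int)) : Prop := out = find_max_diff_pair_alt eorabr
instance (eorabr : List (Int × Int)) (out : Option (Int × Int)) : Decidable (Spec_find_max_diff_pair eorabr out) := by unfold Spec_find_max_diff_pair; infer_instance

-- ===== CLAIM (what is proved, stated in full; the proofs are below) =====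
def Claim_equal_find_max_diff_pair : Prop := ∀ (eorabr : List (Int × Int)), Dom_find_max_diff_pair eorabr → Spec_find_max_diff_pair eorabr (find_max_diff_pair eorabr)

-- ===== LEMMAS AND PROOFS =====

-- proof-only helper: the first-wins maximum by difference (first element attaining the max diff)
def pvMaxBy : (Int × Int) → List (Int × Int) → (Int × Int)
  | m, [] => m
  | m, p :: t => if p.2 - p.1 > m.2 - m.1 then pvMaxBy p t else pvMaxBy m t

-- the running maximum's key never decreases
theorem pvMaxBy_mono : ∀ (t : List (Int × Int)) (m : Int × Int),
    m.2 - m.1 ≤ (pvMaxBy m t).2 - (pvMaxBy m t).1 := by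
  intro t
  induction t with
  | nil => intro m; simp [pvMaxBy]
  | cons p t ih =>
      intro m
      simp only [pvMaxBy]
      split
      · exact le_trans (by omega) (ih p)
      · exact ih m

-- the head of B's insertion sort (reverse order) is the first-wins maximum
theorem pvFoldl_insertBy_head :
    ∀ (t : List (Int × Int)) (m : Int × Int) (rest : List (Int × Int)),
    (t.foldl (fun acc x =>
        PySem.List.insertBy (fun a b => decide ((fun p : Int × Int => p.2 - p.1) b < (fun p : Int × Int => p.2 - p.1) a)) x acc)
      (m :: rest)).head? = some (pvMaxBy m t) := by
  intro t
  induction t with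
  | nil => intro m rest; simp [pvMaxBy]
  | cons x t ih =>
      intro m rest
      simp only [List.foldl, PySem.List.insertBy, pvMaxBy]
      by_cases h : m.2 - m.1 < x.2 - x.1
      · rw [if_pos (by simpa using h), if_pos (by omega)]
        exact ih x (m :: rest)
      · rw [if_neg (by simpa using h), if_neg (by omega)]
        exact ih m _

-- once A holds a pair with positive diff, it tracks exactly the running first-wins maximum
theorem pvLoopA_pos : ∀ (t : List (Int × Int)) (m : Int × Int),
    0 < m.2 - m.1 → pvLoopA t (m.2 - m.1) (some m) = some (pvMaxBy m t) := by
  intro t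
  induction t with
  | nil => intro m _; simp [pvLoopA, pvMaxBy]
  | cons p t ih =>
      intro m hm
      obtain ⟨a, b⟩ := p
      simp only [pvLoopA, pvMaxBy]
      split
      · exact ih (a, b) (by simp at *; omega)
      · exact ih m hm

-- while A's best is still 0 (head pair m has non-positive diff), A's tail run equals the thresholded first-wins maximum
theorem pvLoopA_zero : ∀ (t : List (Int × Int)) (m : Int × Int),
    m.2 - m.1 ≤ 0 →
    pvLoopA t 0 none =
      (if (pvMaxBy m t).2 - (pvMaxBy m t).1 > 0 then some (pvMaxBy m t) else none) := by
  intro t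
  induction t with
  | nil => intro m hm; simp [pvLoopA, pvMaxBy]; omega
  | cons p t ih =>
      intro m hm
      obtain ⟨a, b⟩ := p
      simp only [pvLoopA, pvMaxBy]
      by_cases hp : b - a > 0
      · have h1 : pvLoopA t (b - a) (some (a, b)) = some (pvMaxBy (a, b) t) :=
          pvLoopA_pos t (a, b) (by simpa using hp)
        have h2 : b - a > m.2 - m.1 := by omega
        have h3 : 0 < (pvMaxBy (a, b) t).2 - (pvMaxBy (a, b) t).1 :=
          lt_of_lt_of_le (by simpa using hp) (pvMaxBy_mono t (a, b))
        rw [if_pos hp, h1, if_pos h2, if_pos h3]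
      · have hp' : ¬ ((b : Int) - a > 0) := hp
        split
        · rename_i h
          exact absurd (by simpa using h) hp'
        · split
          · exact ih (a, b) (by simp; omega)
          · exact ih m hm

-- A's result expressed through the first-wins maximum
theorem pvLoopA_char : ∀ (h : Int × Int) (t : List (Int × Int)),
    pvLoopA (h :: t) 0 none =
      (if (pvMaxBy h t).2 - (pvMaxBy h t).1 > 0 then some (pvMaxBy h t) else none) := by
  intro h t
  obtain ⟨a, b⟩ := h
  simp only [pvLoopA]
  by_cases hp : b - a > 0
  · have h1 : pvLoopA t (b - a) (some (a, b)) = some (pvMaxBy (a, b) t) :=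
      pvLoopA_pos t (a, b) (by simpa using hp)
    have h3 : 0 < (pvMaxBy (a, b) t).2 - (pvMaxBy (a, b) t).1 :=
      lt_of_lt_of_le (by simpa using hp) (pvMaxBy_mono t (a, b))
    rw [if_pos hp, h1, if_pos h3]
  · rw [if_neg hp]
    exact pvLoopA_zero t (a, b) (by simp; omega)

-- ===== VERDICT (by name: the statement is the Claim_ definition above) =====
theorem find_max_diff_pair_spec : Claim_equal_find_max_diff_pair := by
  intro eorabr _
  unfold Spec_find_max_diff_pair find_max_diff_pair find_max_diff_pair_alt
  cases eorabr with
  | nil => simp [pvLoopA, PySem.List.sorted_rev_eq_foldl_insertBy]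
  | cons h t =>
      have hs : PySem.List.sorted (h :: t) (fun p : Int × Int => p.2 - p.1) true =
          (h :: t).foldl (fun acc x =>
            PySem.List.insertBy (fun a b => decide ((fun p : Int × Int => p.2 - p.1) b < (fun p : Int × Int => p.2 - p.1) a)) x acc) [] :=
        PySem.List.sorted_rev_eq_foldl_insertBy _ _
      have hhead : (PySem.List.sorted (h :: t) (fun p : Int × Int => p.2 - p.1) true).head? = some (pvMaxBy h t) := by
        rw [hs]
        simpa [PySem.List.insertBy] using pvFoldl_insertBy_head t h []
      cases hsort : PySem.List.sorted (h :: t) (fun p : Int × Int => p.2 - p.1) true with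
      | nil => rw [hsort] at hhead; simp at hhead
      | cons m r =>
          rw [hsort] at hhead
          simp at hhead
          subst hhead
          simpa using pvLoopA_char h t
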